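-- pv_equiv track=rewrite | github.com/yuuforest/Personal-Project | PCCP 모의고사/외톨이 알파벳.py | solution
-- ===== SOURCE A (Python) =====
-- def solution(input_string):
--
--     idx = 0
--     count = {}
--
--     length = len(input_string)
--
--     while idx < length:
--
--         now = input_string[idx]
--         count[now] = count.setdefault(now, 0) + 1
--
--         while idx < length and input_string[idx] == now:
--             idx += 1
--
--     answer = ''
--     for c in count:
--         if count.get(c) > 1:
--             answer += c
--
--     return "".join(sorted(answer)) if answer else "N"
-- ===== SOURCE B (Python) =====
-- def solution(input_string):
--     # A character is "lonely" iff it reappears after its first run ends: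
--     # take the suffix starting at its first occurrence, strip that leading run,
--     # and test membership. No run enumeration, no counting.
--     res = ''.join(sorted(c for c in set(input_string)
--                          if c in input_string[input_string.find(c):].lstrip(c)))
--     return res if res else "N"
-- ===== Notes on version B (the rewrite author's own statement) =====
-- stated objective: idiomatic
-- what changed: A scans the string once with an index, enumerating runs in a nested while loop and maintaining a per-character run counter in a dict; B never enumerates or counts runs: for each distinct character it tests directly whether the character reappears after its first run (slice from its first occurrence, strip that leading run, membership test), then sorts the qualifying characters.
import Mathlib
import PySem

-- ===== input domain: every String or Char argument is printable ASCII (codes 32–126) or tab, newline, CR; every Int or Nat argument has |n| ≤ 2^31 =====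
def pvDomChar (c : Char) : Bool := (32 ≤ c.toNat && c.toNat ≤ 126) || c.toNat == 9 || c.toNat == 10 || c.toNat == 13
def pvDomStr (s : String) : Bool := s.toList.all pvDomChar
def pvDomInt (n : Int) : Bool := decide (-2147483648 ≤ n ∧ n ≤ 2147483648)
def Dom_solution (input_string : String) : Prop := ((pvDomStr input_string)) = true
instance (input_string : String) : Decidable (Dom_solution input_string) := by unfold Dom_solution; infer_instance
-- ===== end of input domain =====

-- B replaces A's run-enumerating scan (nested while + run counter dict) by a direct per-character
-- test — does the character reappear after its first run? — with no counting; same result, more idiomatic.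

-- ===== PORT A =====
-- outer while over idx = recursion on the remaining suffix; the inner while that advances idx past
-- the run of `now` is dropWhile on the suffix (which still starts with `now`).
def pvRunLoop : List Char → PySem.Dict Char Int → PySem.Dict Char Int
  | [], count => count
  | now :: rest, count =>
      let c1 := count.setdefault now 0
      let c2 := c1.insert now (c1.getD now 0 + 1)
      pvRunLoop ((now :: rest).dropWhile (· == now)) c2
  termination_by l _ => l.length
  decreasing_by
    simp only [List.dropWhile_cons, beq_self_eq_true, if_pos, List.length_cons]
    exact Nat.lt_succ_of_le (List.length_dropWhile_le _ _)

def solution (input_string : String) : String :=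
  let count := pvRunLoop input_string.toList PySem.Dict.empty
  -- for c in count: if count.get(c) > 1: answer += c   (count.get(c) always hits: c is a key)
  let answer := count.keys.foldl
      (fun acc c => if count.getD c 0 > 1 then acc ++ [c] else acc) []
  -- "".join(sorted(answer)) if answer else "N"
  if answer ≠ [] then String.ofList (PySem.List.sorted answer (fun c => c) false) else "N"

-- ===== PORT B =====
def solution_alt (input_string : String) : String :=
  let chars := input_string.toList
  -- sorted(c for c in set(input_string) if c in input_string[input_string.find(c):].lstrip(c))
  -- find(c) ≥ 0 for every c drawn from the set; s.lstrip(c) for a single-char argument is exactly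
  -- dropWhile (· == c) (ported by hand: PySem has no lstrip-with-chars primitive); 'c in t' is Chars.isIn.
  let lonely := (PySem.Set.ofList chars).filter (fun c =>
      PySem.Chars.isIn [c]
        ((PySem.List.slice chars (some (PySem.Chars.find chars [c])) none).dropWhile (· == c)))
  let res := String.ofList (PySem.List.sorted lonely (fun c => c) false)
  if res = "" then "N" else res

-- ===== PRECONDITION & SPEC =====
def Spec_solution (input_string : String) (out : String) : Prop := out = solution_alt input_string
instance (input_string : String) (out : String) : Decidable (Spec_solution input_string out) := by unfold Spec_solution; infer_instance

-- ===== CLAIM (what is proved, stated in full; the proofs are below) =====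
def Claim_equal_solution : Prop := ∀ (input_string : String), Dom_solution input_string → Spec_solution input_string (solution input_string)

-- ===== LEMMAS AND PROOFS =====

-- the run-representative list A's outer loop walks through
def pvRepsA : List Char → List Char
  | [] => []
  | now :: rest => now :: pvRepsA ((now :: rest).dropWhile (· == now))
  termination_by l => l.length
  decreasing_by
    simp only [List.dropWhile_cons, beq_self_eq_true, if_pos, List.length_cons]
    exact Nat.lt_succ_of_le (List.length_dropWhile_le _ _)

-- A's setdefault-then-assign step is a single counting insert
lemma pv_step_eq (d : PySem.Dict Char Int) (k : Char) :
    (d.setdefault k 0).insert k ((d.setdefault k 0).getD k 0 + 1)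
      = d.insert k (d.getD k 0 + 1) := by
  rw [PySem.Dict.getD_setdefault_self]
  by_cases h : d.contains k = true
  · rw [PySem.Dict.setdefault_of_contains d 0 h]
  · rw [PySem.Dict.setdefault_of_not_contains d 0 (by simpa using h),
        PySem.Dict.insert_insert_self]

-- A's while loop is the counting fold over its run representatives
lemma pvRunLoop_eq (l : List Char) (d : PySem.Dict Char Int) :
    pvRunLoop l d = (pvRepsA l).foldl (fun d c => d.insert c (d.getD c 0 + 1)) d := by
  induction l, d using pvRunLoop.induct with
  | case1 d => simp [pvRunLoop, pvRepsA]
  | case2 now rest d c1 c2 ih =>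
      rw [pvRunLoop]
      simp only [pvRepsA, List.foldl_cons]
      rw [pv_step_eq d now]
      have hc : c2 = d.insert now (d.getD now 0 + 1) := pv_step_eq d now
      rw [hc] at ih
      exact ih

-- each run contributes its character, so the representatives have the same members as the string
lemma pv_mem_repsA (c : Char) (l : List Char) : c ∈ pvRepsA l ↔ c ∈ l := by
  induction l using pvRepsA.induct with
  | case1 => simp [pvRepsA]
  | case2 now rest ih =>
      rw [pvRepsA]
      simp only [List.mem_cons, ih]
      constructor
      · rintro (h | h)
        · exact Or.inl h
        · rcases List.mem_cons.mp ((List.dropWhile_sublist _).subset h) with h' | h'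
          · exact Or.inl h'
          · exact Or.inr h'
      · rintro (h | h)
        · exact Or.inl h
        · by_cases hc : c = now
          · exact Or.inl hc
          · refine Or.inr ?_
            rw [List.dropWhile_cons_of_pos (by simp)]
            have := List.takeWhile_append_dropWhile (p := (· == now)) (l := rest)
            rcases List.mem_append.mp (this ▸ h) with h' | h'
            · exact absurd (by simpa using List.mem_takeWhile_imp h') hc
            · exact h'

-- stripping a prefix whose elements all fail p commutes into dropWhile p
lemma pv_dropWhile_dropWhile (p q : Char → Bool) (l : List Char)
    (h : ∀ a, q a = true → p a = true) :
    (l.dropWhile q).dropWhile p = l.dropWhile p := by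
  induction l with
  | nil => rfl
  | cons x t ih =>
      by_cases hq : q x = true
      · rw [List.dropWhile_cons_of_pos hq, List.dropWhile_cons_of_pos (h x hq), ih]
      · rw [List.dropWhile_cons_of_neg hq]

-- a single-character substring test is membership
lemma pv_isIn_singleton (c : Char) (l : List Char) :
    PySem.Chars.isIn [c] l = true ↔ c ∈ l := by
  rw [PySem.Chars.isIn_iff_infix]
  constructor
  · intro h; exact h.sublist.subset (List.mem_singleton_self c)
  · intro h
    obtain ⟨s, t, rfl⟩ := List.append_of_mem h
    exact ⟨s, t, by simp⟩

-- find of a single character points at the start of its first run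
lemma pv_drop_find_aux (c : Char) (n : Nat) (l : List Char)
    (h1 : [c] <+: l.drop n) (h2 : ∀ i < n, ¬ [c] <+: l.drop i) :
    l.drop n = l.dropWhile (fun a => !(a == c)) := by
  induction n generalizing l with
  | zero =>
      simp only [List.drop_zero] at h1 ⊢
      obtain ⟨t, rfl⟩ := h1
      simp only [List.singleton_append]
      rw [List.dropWhile_cons_of_neg (by simp)]
  | succ n ih =>
      cases l with
      | nil => simp at h1 ⊢
      | cons x t =>
          have hx : ¬ (x = c) := by
            intro hxc; subst hxc
            exact h2 0 (Nat.succ_pos n) ⟨t, rfl⟩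
          rw [List.drop_succ_cons, List.dropWhile_cons_of_pos (by simp [hx])]
          exact ih t h1 (fun i hi => h2 (i + 1) (by omega))

lemma pv_drop_find (c : Char) (l : List Char) (h : c ∈ l) :
    l.drop (PySem.Chars.find l [c]).toNat = l.dropWhile (fun a => !(a == c)) := by
  have hinf : [c] <:+: l := by
    obtain ⟨s, t, rfl⟩ := List.append_of_mem h
    exact ⟨s, t, by simp⟩
  have hnn : 0 ≤ PySem.Chars.find l [c] := (PySem.Chars.find_nonneg_iff l [c]).mpr hinf
  obtain ⟨h1, h2⟩ := PySem.Chars.find_spec hnn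
  exact pv_drop_find_aux c _ l h1 h2

-- THE algorithmic fact: a character heads more than one run iff it reappears after its first run
lemma pv_main (c : Char) (l : List Char) :
    1 < (pvRepsA l).count c ↔
      c ∈ ((l.dropWhile (fun a => !(a == c))).dropWhile (· == c)) := by
  induction l using pvRepsA.induct with
  | case1 => simp [pvRepsA]
  | case2 now rest ih =>
      rw [pvRepsA]
      by_cases hc : c = now
      · subst hc
        have hR : List.dropWhile (fun a => !(a == c)) (c :: rest) = c :: rest :=
          List.dropWhile_cons_of_neg (by simp)
        rw [hR, List.count_cons, if_pos (by simp)]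
        have hmem : 0 < (pvRepsA ((c :: rest).dropWhile (· == c))).count c ↔
            c ∈ (c :: rest).dropWhile (· == c) :=
          List.count_pos_iff.trans (pv_mem_repsA c _)
        exact ⟨fun h => hmem.mp (by omega), fun h => by have := hmem.mpr h; omega⟩
      · have hstrip : List.dropWhile (fun a => !(a == c)) ((now :: rest).dropWhile (· == now))
            = List.dropWhile (fun a => !(a == c)) (now :: rest) :=
          pv_dropWhile_dropWhile (fun a => !(a == c)) (· == now) (now :: rest)
            (fun a ha => by simp only [beq_iff_eq] at ha; subst ha; simp [Ne.symm hc])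
        rw [List.count_cons, if_neg (by simp [Ne.symm hc]), Nat.add_zero, ih, hstrip]

-- ===== VERDICT (by name: the statement is the Claim_ definition above) =====
theorem solution_spec : Claim_equal_solution := by
  intro s _
  show solution s = solution_alt s
  unfold solution solution_alt
  simp only []
  rw [pvRunLoop_eq, PySem.Dict.foldl_insert_getD_add_one_eq_counter]
  have hfun : (fun (acc : List Char) c => if (PySem.Dict.counter (pvRepsA s.toList)).getD c 0 > 1 then acc ++ [c] else acc)
      = (fun acc c => if (fun c => decide ((PySem.Dict.counter (pvRepsA s.toList)).getD c 0 > 1)) c = true then acc ++ [(fun (c : Char) => c) c] else acc) := by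
    funext acc c; simp
  rw [hfun, PySem.List.foldl_append_if, List.nil_append, List.map_id', PySem.Dict.keys_counter]
  have hperm : ((PySem.Set.ofList (pvRepsA s.toList)).filter
        (fun c => decide ((PySem.Dict.counter (pvRepsA s.toList)).getD c 0 > 1))).Perm
      ((PySem.Set.ofList s.toList).filter (fun c =>
        PySem.Chars.isIn [c]
          ((PySem.List.slice s.toList (some (PySem.Chars.find s.toList [c])) none).dropWhile (· == c)))) := by
    rw [List.perm_ext_iff_of_nodup ((PySem.Set.nodup_ofList _).filter _)
          ((PySem.Set.nodup_ofList _).filter _)]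
    intro c
    rw [List.mem_filter, List.mem_filter, PySem.Set.mem_ofList, PySem.Set.mem_ofList,
        pv_mem_repsA]
    constructor
    · rintro ⟨hm, hp⟩
      refine ⟨hm, ?_⟩
      have hcount : 1 < (pvRepsA s.toList).count c := by
        have := of_decide_eq_true hp
        rw [PySem.Dict.getD_counter] at this
        exact_mod_cast this
      have hfind : 0 ≤ PySem.Chars.find s.toList [c] := by
        rw [PySem.Chars.find_nonneg_iff]
        obtain ⟨a, b, hab⟩ := List.append_of_mem hm
        exact ⟨a, b, by rw [hab]; simp⟩
      rw [PySem.List.slice_from s.toList hfind, pv_drop_find c s.toList hm, pv_isIn_singleton]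
      exact (pv_main c s.toList).mp hcount
    · rintro ⟨hm, hp⟩
      refine ⟨hm, ?_⟩
      have hfind : 0 ≤ PySem.Chars.find s.toList [c] := by
        rw [PySem.Chars.find_nonneg_iff]
        obtain ⟨a, b, hab⟩ := List.append_of_mem hm
        exact ⟨a, b, by rw [hab]; simp⟩
      rw [PySem.List.slice_from s.toList hfind, pv_drop_find c s.toList hm, pv_isIn_singleton] at hp
      have hcount := (pv_main c s.toList).mpr hp
      refine decide_eq_true ?_
      rw [PySem.Dict.getD_counter]
      exact_mod_cast hcount
  have hsort := (PySem.List.sorted_id_eq_sorted_id_iff_perm _ _).mpr hperm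
  rw [hsort]
  have hnil : ((PySem.Set.ofList (pvRepsA s.toList)).filter
        (fun c => decide ((PySem.Dict.counter (pvRepsA s.toList)).getD c 0 > 1)) = [])
      ↔ ((PySem.Set.ofList s.toList).filter (fun c =>
        PySem.Chars.isIn [c]
          ((PySem.List.slice s.toList (some (PySem.Chars.find s.toList [c])) none).dropWhile (· == c))) = []) :=
    ⟨fun h => ((h ▸ hperm).symm).eq_nil, fun h => (h ▸ hperm).eq_nil⟩
  by_cases hB : (PySem.Set.ofList s.toList).filter (fun c =>
        PySem.Chars.isIn [c]
          ((PySem.List.slice s.toList (some (PySem.Chars.find s.toList [c])) none).dropWhile (· == c))) = []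
  · rw [if_neg (not_not_intro (hnil.mpr hB)),
        if_pos (by rw [(PySem.List.sorted_eq_nil_iff _ _ _).mpr hB])]
  · rw [if_pos (fun h => hB (hnil.mp h)), if_neg ?_]
    intro hcon
    have : PySem.List.sorted ((PySem.Set.ofList s.toList).filter (fun c =>
        PySem.Chars.isIn [c]
          ((PySem.List.slice s.toList (some (PySem.Chars.find s.toList [c])) none).dropWhile (· == c))))
        (fun c => c) false = [] := by
      rwa [String.ofList_eq, show ("" : String).toList = [] from rfl] at hcon
    exact hB ((PySem.List.sorted_eq_nil_iff _ _ _).mp this)
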